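-- pv_equiv track=rewrite | github.com/ashish0o0/pyhton-practice | geeksforgeeks/freq_element_in_array.py | mostFreqEle
-- ===== SOURCE A (Python) =====
-- def mostFreqEle(arr):
--     min_val = min(arr)
--     max_val = max(arr)
--
--     freq = [0] * (max_val - min_val + 1)
--
--     for i in range(0, len(arr)):
--         freq[arr[i] - min_val] += 1
--
--     max_value = max(freq)
--     reversed_index = freq[::-1].index(max_value)
--     index = len(freq) - 1 - reversed_index
--
--     return index + min_val
-- ===== SOURCE B (Python) =====
-- def mostFreqEle(arr):
--     freq = {}
--     for x in arr:
--         freq[x] = freq.get(x, 0) + 1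
--     best = None
--     for v, c in freq.items():
--         if best is None or c > best[1] or (c == best[1] and v > best[0]):
--             best = (v, c)
--     return best[0]
-- ===== Notes on version B (the rewrite author's own statement) =====
-- stated objective: faster
-- what changed: A allocates a frequency table of size max(arr)-min(arr)+1 and scans it (plus a reversed-list .index pass); B counts occurrences in one dict pass and takes the (count, value)-lexicographic maximum over the counter's items, so cost depends only on n, not on the value range.
-- outside the precondition, e.g. on mostFreqEle([]): A raises ValueError, B raises TypeError
import Mathlib
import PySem

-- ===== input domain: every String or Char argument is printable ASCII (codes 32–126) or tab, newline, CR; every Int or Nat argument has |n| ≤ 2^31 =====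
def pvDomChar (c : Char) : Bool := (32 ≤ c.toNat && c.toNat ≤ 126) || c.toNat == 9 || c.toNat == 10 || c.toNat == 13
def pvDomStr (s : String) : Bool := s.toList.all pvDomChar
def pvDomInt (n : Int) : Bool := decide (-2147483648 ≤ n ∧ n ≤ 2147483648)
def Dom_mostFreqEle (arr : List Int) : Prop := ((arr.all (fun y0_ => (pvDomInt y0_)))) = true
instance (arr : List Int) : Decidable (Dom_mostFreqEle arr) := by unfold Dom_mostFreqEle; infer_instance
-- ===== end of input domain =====

-- B replaces A's value-range frequency table (size max_val-min_val+1) by one dict-counting pass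
-- plus a lexicographic argmax scan over the counter's items: same return value on every non-empty list.


-- ===== PORT A =====
-- 'freq[arr[i]-min_val] += 1' is ported with pySetD/pyGetD (exact whenever the index is in
-- range, which it always is here since min_val ≤ arr[i] ≤ max_val); 'freq[::-1]' is ported as
-- freq.reverse, exact by PySem.List.slice?_none_none_neg_one (slice? xs none none (-1) = some xs.reverse).
def mostFreqEle (arr : List Int) : Int :=
  match PySem.List.min? arr (fun x => x), PySem.List.max? arr (fun x => x) with
  | some minVal, some maxVal =>
    let freq0 : List Int := List.replicate (maxVal - minVal + 1).toNat 0
    let freq := (PySem.List.pyRange 0 (arr.length : Int) 1).foldl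
      (fun f i =>
        PySem.List.pySetD f (PySem.List.pyGetD arr i 0 - minVal)
          (PySem.List.pyGetD f (PySem.List.pyGetD arr i 0 - minVal) 0 + 1)) freq0
    match PySem.List.max? freq (fun x => x) with
    | some maxValue =>
      match PySem.List.index? freq.reverse maxValue with
      | some revIdx => ((freq.length : Int) - 1 - (revIdx : Int)) + minVal
      | none => 0
    | none => 0
  | _, _ => 0

-- ===== PORT B =====
def mostFreqEle_alt (arr : List Int) : Int :=
  let freq := arr.foldl (fun d x => d.modify x 0 (· + 1)) (PySem.Dict.empty : PySem.Dict Int Int)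
  let best := freq.items.foldl
    (fun (best : Option (Int × Int)) p =>
      match best with
      | none => some p
      | some b => if p.2 > b.2 ∨ (p.2 = b.2 ∧ p.1 > b.1) then some p else some b)
    none
  match best with
  | some b => b.1
  | none => 0

-- ===== PRECONDITION & SPEC =====
-- A raises ValueError on the empty list (min([])); B raises TypeError there too.
def Pre_mostFreqEle (arr : List Int) : Prop := arr ≠ []
instance (arr : List Int) : Decidable (Pre_mostFreqEle arr) := by unfold Pre_mostFreqEle; infer_instance
def pvWitness_mostFreqEle : List Int := [3, 1, 3, 2, 1]

def Spec_mostFreqEle (arr : List Int) (out : Int) : Prop := out = mostFreqEle_alt arr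
instance (arr : List Int) (out : Int) : Decidable (Spec_mostFreqEle arr out) := by unfold Spec_mostFreqEle; infer_instance

-- ===== CLAIM (what is proved, stated in full; the proofs are below) =====
def Claim_equal_mostFreqEle : Prop := ∀ (arr : List Int), Dom_mostFreqEle arr → Pre_mostFreqEle arr → Spec_mostFreqEle arr (mostFreqEle arr)

-- ===== LEMMAS AND PROOFS =====

-- Both programs return the unique v with: v ∈ arr, v's count is maximal among members of arr,
-- and v is the largest value attaining that count (pvBest below).
def pvBest (arr : List Int) (v : Int) : Prop :=
  v ∈ arr ∧ (∀ w ∈ arr, arr.count w ≤ arr.count v) ∧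
    (∀ w ∈ arr, arr.count w = arr.count v → w ≤ v)

theorem pvBest_unique {arr : List Int} {v v' : Int} (h : pvBest arr v) (h' : pvBest arr v') :
    v = v' := by
  obtain ⟨hm, hc, hl⟩ := h
  obtain ⟨hm', hc', hl'⟩ := h'
  have e : arr.count v = arr.count v' := le_antisymm (hc' v hm) (hc v' hm')
  exact le_antisymm (hl' v hm e) (hl v' hm' e.symm)

def pvStep (minVal : Int) : List Int → Int → List Int := fun f x =>
  PySem.List.pySetD f (x - minVal) (PySem.List.pyGetD f (x - minVal) 0 + 1)

theorem pvFreqInv (minVal : Int) (l : List Int) (g : List Int)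
    (hmem : ∀ x ∈ l, 0 ≤ x - minVal ∧ x - minVal < (g.length : Int)) :
    (l.foldl (pvStep minVal) g).length = g.length ∧
    ∀ j : Nat, j < g.length →
      PySem.List.pyGetD (l.foldl (pvStep minVal) g) (j : Int) 0
        = PySem.List.pyGetD g (j : Int) 0 + l.count (minVal + (j : Int)) := by
  induction l generalizing g with
  | nil => simp
  | cons x l ih =>
    obtain ⟨hx0, hxlt⟩ := hmem x (by simp)
    have hidx : x - minVal = (((x - minVal).toNat : Nat) : Int) := by omega
    have hlen' : (pvStep minVal g x).length = g.length := by
      simp [pvStep, PySem.List.length_pySetD]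
    have hnat : (x - minVal).toNat < g.length := by omega
    have ih' := ih (pvStep minVal g x) (by
      intro y hy
      obtain ⟨h1, h2⟩ := hmem y (by simp [hy])
      exact ⟨h1, by omega⟩)
    refine ⟨by simp [List.foldl_cons, ih'.1, hlen'], ?_⟩
    intro j hj
    have h2 := ih'.2 j (by omega)
    rw [List.foldl_cons, h2]
    have hstep : pvStep minVal g x
        = PySem.List.pySetD g (((x - minVal).toNat : Nat) : Int)
            (PySem.List.pyGetD g (((x - minVal).toNat : Nat) : Int) 0 + 1) := by
      simp only [pvStep]; conv_lhs => rw [hidx]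
    rw [hstep, PySem.List.pyGetD_pySetD_natCast g _ j _ 0 hnat, List.count_cons]
    by_cases hc : j = (x - minVal).toNat
    · subst hc
      rw [if_pos rfl, if_pos (beq_iff_eq.mpr (by omega))]
      push_cast; ring
    · rw [if_neg hc, if_neg (by simp only [beq_iff_eq]; omega)]
      push_cast; ring

theorem pvA_best (arr : List Int) (h : arr ≠ []) : pvBest arr (mostFreqEle arr) := by
  cases hmin : PySem.List.min? arr (fun x => x) with
  | none => exact absurd ((PySem.List.min?_eq_none_iff arr _).mp hmin) h
  | some minVal =>
  cases hmax : PySem.List.max? arr (fun x => x) with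
  | none => exact absurd ((PySem.List.max?_eq_none_iff arr _).mp hmax) h
  | some maxVal =>
  have hminmem : minVal ∈ arr := PySem.List.min?_mem hmin
  have hmaxmem : maxVal ∈ arr := PySem.List.max?_mem hmax
  have hminle : ∀ y ∈ arr, minVal ≤ y := PySem.List.min?_isMin hmin
  have hlemax : ∀ y ∈ arr, y ≤ maxVal := PySem.List.max?_isMax hmax
  have hmm : minVal ≤ maxVal := hminle maxVal hmaxmem
  set K : Nat := (maxVal - minVal + 1).toNat with hK
  have hKpos : 0 < K := by omega
  have hKint : (K : Int) = maxVal - minVal + 1 := by omega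
  set freq0 : List Int := List.replicate K 0 with hfreq0
  have hmem : ∀ x ∈ arr, 0 ≤ x - minVal ∧ x - minVal < (freq0.length : Int) := by
    intro x hx
    have h1 := hminle x hx
    have h2 := hlemax x hx
    simp only [hfreq0, List.length_replicate]
    omega
  have inv := pvFreqInv minVal arr freq0 hmem
  set freq : List Int := arr.foldl (pvStep minVal) freq0 with hfreq
  have hflen : freq.length = K := by simpa [hfreq0] using inv.1
  have hcount : ∀ j : Nat, j < K → ∀ (hj : j < freq.length),
      freq[j] = (arr.count (minVal + (j : Int)) : Int) := by
    intro j hjK hj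
    have := inv.2 j (by simpa [hfreq0] using hjK)
    rw [PySem.List.pyGetD_eq_getElem freq 0 (by positivity) (by exact_mod_cast hj),
        PySem.List.pyGetD_eq_getElem freq0 0 (by positivity)
          (by simp [hfreq0]; exact_mod_cast hjK)] at this
    simpa [hfreq0] using this
  have hfold : (PySem.List.pyRange 0 (arr.length : Int) 1).foldl
      (fun f i =>
        PySem.List.pySetD f (PySem.List.pyGetD arr i 0 - minVal)
          (PySem.List.pyGetD f (PySem.List.pyGetD arr i 0 - minVal) 0 + 1)) freq0 = freq :=
    PySem.List.foldl_pyRange_zero_pyGetD' arr 0 (pvStep minVal) freq0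
  have hfne : freq ≠ [] := by
    intro hnil; rw [hnil] at hflen; simp at hflen; omega
  cases hmv : PySem.List.max? freq (fun x => x) with
  | none => exact absurd ((PySem.List.max?_eq_none_iff freq _).mp hmv) hfne
  | some m =>
  have hmmem : m ∈ freq := PySem.List.max?_mem hmv
  have hmtop : ∀ y ∈ freq, y ≤ m := PySem.List.max?_isMax hmv
  have hms : (PySem.List.index? freq.reverse m).isSome := by
    rw [PySem.List.index?_isSome_iff]; simpa using hmmem
  obtain ⟨r, hr⟩ := Option.isSome_iff_exists.mp hms
  obtain ⟨hrlt, hrget, hrfirst⟩ := PySem.List.getElem_of_index?_eq_some hr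
  have hrK : r < K := by simpa [hflen] using hrlt
  set i : Nat := K - 1 - r with hi
  have hiK : i < K := by omega
  have hig : freq[i]'(by omega) = m := by
    rw [List.getElem_reverse] at hrget
    have : freq.length - 1 - r = i := by omega
    simpa [this] using hrget
  -- the value A returns
  have hval : mostFreqEle arr = minVal + (i : Int) := by
    simp only [mostFreqEle, hmin, hmax]
    rw [← hK, ← hfreq0, hfold]
    simp only [hmv]
    simp only [hr]
    rw [hflen]
    omega
  rw [hval]
  have hca : (arr.count (minVal + (i : Int)) : Int) = m := by
    rw [← hig]; exact (hcount i hiK (by omega)).symm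
  -- every value's count is ≤ m
  have hle : ∀ w ∈ arr, (arr.count w : Int) ≤ m := by
    intro w hw
    obtain ⟨h1, h2⟩ := hmem w hw
    set j : Nat := (w - minVal).toNat with hj
    have hjK : j < K := by simp [hfreq0] at h2; omega
    have hwj : w = minVal + (j : Int) := by omega
    have := hcount j hjK (by omega)
    rw [← hwj] at this
    calc (arr.count w : Int) = freq[j]'(by omega) := this.symm
      _ ≤ m := hmtop _ (List.getElem_mem _)
  constructor
  · -- membership: count a ≥ 1
    obtain ⟨x, hx⟩ := List.exists_mem_of_ne_nil arr h
    have h1 : 1 ≤ arr.count x := List.one_le_count_iff.mpr hx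
    have := hle x hx
    have : 1 ≤ arr.count (minVal + (i : Int)) := by omega
    exact List.one_le_count_iff.mp this
  refine ⟨fun w hw => by have := hle w hw; omega, ?_⟩
  -- tie-break: any w with maximal count satisfies w ≤ a
  intro w hw hcw
  by_contra hgt
  rw [not_le] at hgt
  obtain ⟨h1, h2⟩ := hmem w hw
  set j : Nat := (w - minVal).toNat with hj
  have hjK : j < K := by simp [hfreq0] at h2; omega
  have hwj : w = minVal + (j : Int) := by omega
  have hij : i < j := by omega
  have hgj : freq[j]'(by omega) = m := by
    have := hcount j hjK (by omega)
    rw [← hwj] at this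
    omega
  have hrev2 : freq.reverse[K - 1 - j]'(by simp [hflen]; omega) = freq[j]'(by omega) := by
    rw [List.getElem_reverse]
    congr 1
    omega
  exact hrfirst (K - 1 - j) (by omega) (hrev2.trans hgj)

def pvPick : Option (Int × Int) → (Int × Int) → Option (Int × Int) := fun best p =>
  match best with
  | none => some p
  | some b => if p.2 > b.2 ∨ (p.2 = b.2 ∧ p.1 > b.1) then some p else some b

def pvLexLe (p q : Int × Int) : Prop := p.2 < q.2 ∨ (p.2 = q.2 ∧ p.1 ≤ q.1)

theorem pvLexLe_trans {a b c : Int × Int} (h1 : pvLexLe a b) (h2 : pvLexLe b c) :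
    pvLexLe a c := by
  obtain ⟨a1, a2⟩ := a; obtain ⟨b1, b2⟩ := b; obtain ⟨c1, c2⟩ := c
  simp only [pvLexLe] at *
  omega

theorem pvPick_spec (L : List (Int × Int)) (b : Int × Int) :
    ∃ c, L.foldl pvPick (some b) = some c ∧ (c = b ∨ c ∈ L) ∧ pvLexLe b c ∧
      ∀ p ∈ L, pvLexLe p c := by
  induction L generalizing b with
  | nil => exact ⟨b, rfl, Or.inl rfl, Or.inr ⟨rfl, le_refl _⟩, by simp⟩
  | cons p L ih =>
    by_cases hcond : p.2 > b.2 ∨ (p.2 = b.2 ∧ p.1 > b.1)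
    · obtain ⟨c, hc, hmem, hle, hall⟩ := ih p
      refine ⟨c, ?_, ?_, ?_, ?_⟩
      · rw [List.foldl_cons]; simpa [pvPick, if_pos hcond] using hc
      · rcases hmem with h | h
        · exact Or.inr (by simp [h])
        · exact Or.inr (by simp [h])
      · refine pvLexLe_trans ?_ hle
        obtain ⟨b1, b2⟩ := b; obtain ⟨p1, p2⟩ := p
        simp only [pvLexLe] at *; omega
      · intro q hq
        rcases List.mem_cons.mp hq with h | h
        · exact h ▸ hle
        · exact hall q h
    · obtain ⟨c, hc, hmem, hle, hall⟩ := ih b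
      refine ⟨c, ?_, ?_, ?_, ?_⟩
      · rw [List.foldl_cons]; simpa [pvPick, if_neg hcond] using hc
      · rcases hmem with h | h
        · exact Or.inl h
        · exact Or.inr (by simp [h])
      · exact hle
      · intro q hq
        rcases List.mem_cons.mp hq with h | h
        · subst h
          refine pvLexLe_trans ?_ hle
          obtain ⟨b1, b2⟩ := b; obtain ⟨q1, q2⟩ := q
          simp only [pvLexLe] at *; omega
        · exact hall q h

theorem pvB_best (arr : List Int) (h : arr ≠ []) : pvBest arr (mostFreqEle_alt arr) := by
  have hctr : arr.foldl (fun d x => d.modify x 0 (· + 1)) (PySem.Dict.empty : PySem.Dict Int Int)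
      = PySem.Dict.counter arr := (PySem.Dict.counter_eq_foldl arr).symm
  have hitems : (PySem.Dict.counter arr).items
      = (PySem.Set.ofList arr).map (fun k => (k, (arr.count k : Int))) :=
    PySem.Dict.items_counter arr
  obtain ⟨x, hx⟩ := List.exists_mem_of_ne_nil arr h
  have hxS : x ∈ PySem.Set.ofList arr := (PySem.Set.mem_ofList arr x).mpr hx
  obtain ⟨q, S, hS⟩ : ∃ q S, (PySem.Set.ofList arr).map (fun k => (k, (arr.count k : Int))) = q :: S := by
    apply List.exists_cons_of_ne_nil
    simp only [ne_eq, List.map_eq_nil_iff]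
    intro hE; rw [hE] at hxS; simp at hxS
  obtain ⟨c, hc, hmem, hle, hall⟩ := pvPick_spec S q
  have hval : mostFreqEle_alt arr = c.1 := by
    simp only [mostFreqEle_alt, hctr, hitems, hS, List.foldl_cons]
    have : S.foldl (fun (best : Option (Int × Int)) p =>
        match best with
        | none => some p
        | some b => if p.2 > b.2 ∨ (p.2 = b.2 ∧ p.1 > b.1) then some p else some b) (some q)
        = some c := hc
    rw [this]
  have hcL : c ∈ (PySem.Set.ofList arr).map (fun k => (k, (arr.count k : Int))) := by
    rw [hS]
    rcases hmem with h' | h'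
    · simp [h']
    · simp [h']
  have hallL : ∀ p ∈ (PySem.Set.ofList arr).map (fun k => (k, (arr.count k : Int))), pvLexLe p c := by
    intro p hp
    rw [hS] at hp
    rcases List.mem_cons.mp hp with h' | h'
    · exact h' ▸ hle
    · exact hall p h'
  obtain ⟨v, hvS, hvc⟩ := List.mem_map.mp hcL
  have hv : v ∈ arr := (PySem.Set.mem_ofList arr v).mp hvS
  have hkey : ∀ w ∈ arr, pvLexLe (w, (arr.count w : Int)) (v, (arr.count v : Int)) := by
    intro w hw
    have : (w, (arr.count w : Int)) ∈ (PySem.Set.ofList arr).map (fun k => (k, (arr.count k : Int))) :=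
      List.mem_map.mpr ⟨w, (PySem.Set.mem_ofList arr w).mpr hw, rfl⟩
    have := hallL _ this
    rwa [← hvc] at this
  rw [hval, ← hvc]
  dsimp only
  refine ⟨hv, ?_, ?_⟩
  · intro w hw
    have := hkey w hw
    simp only [pvLexLe] at this
    omega
  · intro w hw hcw
    have := hkey w hw
    simp only [pvLexLe] at this
    omega

-- ===== VERDICT (by name: the statement is the Claim_ definition above) =====
theorem mostFreqEle_spec : Claim_equal_mostFreqEle := by
  intro arr _ hpre
  unfold Spec_mostFreqEle
  exact pvBest_unique (pvA_best arr hpre) (pvB_best arr hpre)
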